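-- pv_equiv track=rewrite | github.com/msiemieniukmorawski/python | Day_5/zad_4.py | print_10_count
-- ===== SOURCE A (Python) =====
-- def print_10_count(text):
--     text= list(text)
--     b = [''] * 10
--     c = [1] * 10
--     for ii, j in enumerate(text):
--         if(ii < 10):
--             b[ii] = j
--         else:
--             if j in b:
--                 for x, y in enumerate(b):
--                     if j == y:
--                         c[x] += 1
--     zipped_list = zip(b, c)
--     return list(zipped_list)
-- ===== SOURCE B (Python) =====
-- def print_10_count(text):
--     tail = list(text[10:])
--     padded = list(text[:10]) + [''] * 10
--     return [(ch, 1 + tail.count(ch)) for ch in padded[:10]]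
-- ===== Notes on version B (the rewrite author's own statement) =====
-- stated objective: alternative
-- what changed: Replaces A's single accumulator loop over the whole text (per-character membership test plus an inner enumerate-scan incrementing matching slots) with slicing and ten independent list.count calls, one per slot, maintaining no counters at all.
import Mathlib
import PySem

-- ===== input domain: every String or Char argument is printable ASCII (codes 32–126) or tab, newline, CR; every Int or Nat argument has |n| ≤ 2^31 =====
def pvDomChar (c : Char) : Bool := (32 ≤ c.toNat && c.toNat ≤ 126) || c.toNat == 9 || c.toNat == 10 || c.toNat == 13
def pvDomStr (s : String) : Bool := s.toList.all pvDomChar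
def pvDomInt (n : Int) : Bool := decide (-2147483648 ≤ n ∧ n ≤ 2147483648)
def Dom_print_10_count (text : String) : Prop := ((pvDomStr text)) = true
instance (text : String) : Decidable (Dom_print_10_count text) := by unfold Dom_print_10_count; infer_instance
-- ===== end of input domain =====

-- B replaces A's single accumulator loop (membership test + inner scan incrementing matching
-- slots) with slicing and ten independent list.count calls, one per slot (objective: simpler).

-- ===== PORT A =====
-- a Python character (element of list(text)) is a one-character string
def pvChar (j : Char) : String := String.ofList [j]

-- inner loop: for x, y in enumerate(b): if j == y: c[x] += 1
def pvBump (j : String) : List String → List Int → List Int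
  | y :: bs, cv :: cs => (if j == y then cv + 1 else cv) :: pvBump j bs cs
  | _, cs => cs

-- outer loop: for ii, j in enumerate(text)
def pvLoop : Nat → List Char → List String → List Int → List String × List Int
  | _, [], b, c => (b, c)
  | ii, j :: rest, b, c =>
    if ii < 10 then pvLoop (ii + 1) rest (b.set ii (pvChar j)) c
    else if pvChar j ∈ b then pvLoop (ii + 1) rest b (pvBump (pvChar j) b c)
    else pvLoop (ii + 1) rest b c

def print_10_count (text : String) : List (String × Int) :=
  let r := pvLoop 0 text.toList (List.replicate 10 "") (List.replicate 10 1)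
  r.1.zip r.2

-- ===== PORT B =====
def print_10_count_alt (text : String) : List (String × Int) :=
  let tail := (text.toList.drop 10).map pvChar     -- tail = list(text[10:])
  let padded := (text.toList.take 10).map pvChar ++ List.replicate 10 ""  -- list(text[:10]) + ['']*10
  (padded.take 10).map (fun ch => (ch, 1 + (PySem.List.count tail ch : Int)))

-- ===== PRECONDITION & SPEC =====
def Spec_print_10_count (text : String) (out : List (String × Int)) : Prop := out = print_10_count_alt text
instance (text : String) (out : List (String × Int)) : Decidable (Spec_print_10_count text out) := by unfold Spec_print_10_count; infer_instance

-- ===== CLAIM (what is proved, stated in full; the proofs are below) =====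
def Claim_equal_print_10_count : Prop := ∀ (text : String), Dom_print_10_count text → Spec_print_10_count text (print_10_count text)

-- ===== LEMMAS AND PROOFS =====

-- c with, at each position x, c[x] + (number of occurrences of b[x] in js)
def pvAddCount (b : List String) (c : List Int) (js : List String) : List Int :=
  match b, c with
  | y :: bs, cv :: cs => (cv + (js.count y : Int)) :: pvAddCount bs cs js
  | _, cs => cs

lemma pvBump_not_mem (j : String) : ∀ (b : List String) (c : List Int), j ∉ b → pvBump j b c = c := by
  intro b
  induction b with
  | nil => intro c _; cases c <;> simp [pvBump]
  | cons y bs ih =>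
    intro c h
    cases c with
    | nil => simp [pvBump]
    | cons cv cs =>
      simp only [List.mem_cons, not_or] at h
      simp [pvBump, ih cs h.2, h.1]

lemma pvLoop_phase2 : ∀ (cs : List Char) (ii : Nat) (b : List String) (c : List Int), 10 ≤ ii →
    pvLoop ii cs b c = (b, cs.foldl (fun c ch => pvBump (pvChar ch) b c) c) := by
  intro cs
  induction cs with
  | nil => intro ii b c _; simp [pvLoop]
  | cons ch cs ih =>
    intro ii b c h
    by_cases hmem : pvChar ch ∈ b
    · simp [pvLoop, Nat.not_lt.mpr h, hmem, ih (ii + 1) b _ (by omega)]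
    · simp [pvLoop, Nat.not_lt.mpr h, hmem, ih (ii + 1) b _ (by omega),
        pvBump_not_mem (pvChar ch) b c hmem]

lemma pvAddCount_nil : ∀ (b : List String) (c : List Int), pvAddCount b c [] = c := by
  intro b
  induction b with
  | nil => intro c; cases c <;> simp [pvAddCount]
  | cons y bs ih => intro c; cases c <;> simp [pvAddCount, ih]

lemma pvAddCount_bump (j : String) (js : List String) :
    ∀ (b : List String) (c : List Int), pvAddCount b (pvBump j b c) js = pvAddCount b c (j :: js) := by
  intro b
  induction b with
  | nil => intro c; cases c <;> simp [pvBump, pvAddCount]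
  | cons y bs ih =>
    intro c
    cases c with
    | nil => simp [pvBump, pvAddCount]
    | cons cv cs =>
      simp only [pvBump, pvAddCount, ih, List.count_cons]
      by_cases h : j = y
      · simp [h]; ring
      · have h' : (j == y) = false := by simp [h]
        simp [h']

lemma foldl_pvBump (b : List String) : ∀ (js : List String) (c : List Int),
    js.foldl (fun c j => pvBump j b c) c = pvAddCount b c js := by
  intro js
  induction js with
  | nil => intro c; simp [pvAddCount_nil]
  | cons j js ih => intro c; simp [List.foldl_cons, ih, pvAddCount_bump]

lemma pvLoop_spec : ∀ (cs : List Char) (pre : List String) (c : List Int), pre.length ≤ 10 →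
    pvLoop pre.length cs (pre ++ List.replicate (10 - pre.length) "") c =
      (pre ++ (cs.take (10 - pre.length)).map pvChar ++ List.replicate (10 - pre.length - cs.length) "",
       (cs.drop (10 - pre.length)).foldl
         (fun c ch => pvBump (pvChar ch)
           (pre ++ (cs.take (10 - pre.length)).map pvChar ++ List.replicate (10 - pre.length - cs.length) "") c) c) := by
  intro cs
  induction cs with
  | nil => intro pre c _; simp [pvLoop]
  | cons ch cs ih =>
    intro pre c hle
    by_cases h : pre.length < 10
    · have hstep : 10 - pre.length = (10 - (pre.length + 1)) + 1 := by omega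
      have hset : (pre ++ List.replicate (10 - pre.length) "").set pre.length (pvChar ch)
          = (pre ++ [pvChar ch]) ++ List.replicate (10 - (pre.length + 1)) "" := by
        rw [hstep, List.replicate_succ]
        rw [List.set_append_right _ _ (le_refl _)]
        simp
      have := ih (pre ++ [pvChar ch]) c (by simp; omega)
      simp only [List.length_append, List.length_cons, List.length_nil] at this
      simp only [pvLoop, h, if_true, hset]
      rw [show pre.length + 1 = pre.length + (0 + 1) by ring] at this ⊢
      rw [this]
      rw [hstep]
      simp [List.append_assoc]
    · have h10 : pre.length = 10 := by omega
      have hz : 10 - pre.length = 0 := by omega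
      rw [hz]
      simp only [List.replicate_zero, List.take_zero, List.drop_zero, List.map_nil,
        List.append_nil, Nat.zero_sub]
      rw [h10]
      exact pvLoop_phase2 (ch :: cs) 10 pre c (le_refl _)

lemma zip_pvAddCount : ∀ (b : List String) (js : List String),
    b.zip (pvAddCount b (List.replicate b.length 1) js) = b.map (fun y => (y, 1 + (js.count y : Int))) := by
  intro b
  induction b with
  | nil => intro js; simp [pvAddCount]
  | cons y bs ih =>
    intro js
    simp only [List.length_cons, List.replicate_succ, pvAddCount, List.zip_cons_cons, List.map_cons, ih]

-- take 10 of "head ++ ['']*10" is "head ++ ['']*(10 - head.length)" when head has ≤ 10 elements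
lemma take_pad (l : List String) (h : l.length ≤ 10) :
    (l ++ List.replicate 10 "").take 10 = l ++ List.replicate (10 - l.length) "" := by
  rw [List.take_append, List.take_of_length_le h, List.take_replicate]
  congr 2
  omega

-- ===== VERDICT (by name: the statement is the Claim_ definition above) =====
theorem print_10_count_spec : Claim_equal_print_10_count := by
  intro text _
  unfold Spec_print_10_count print_10_count print_10_count_alt
  have h := pvLoop_spec text.toList [] (List.replicate 10 1) (by simp)
  simp only [List.length_nil, Nat.sub_zero, List.nil_append] at h
  rw [h]
  set cs := text.toList with hcs
  set B := (cs.take 10).map pvChar ++ List.replicate (10 - cs.length) "" with hB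
  have hlen : B.length = 10 := by
    simp [hB]
    omega
  dsimp only
  rw [show List.foldl (fun c ch => pvBump (pvChar ch) B c) (List.replicate 10 1) (cs.drop 10)
      = ((cs.drop 10).map pvChar).foldl (fun c j => pvBump j B c) (List.replicate 10 1)
    from by rw [List.foldl_map]]
  rw [show (List.replicate 10 (1 : Int)) = List.replicate B.length 1 from by rw [hlen]]
  rw [foldl_pvBump, zip_pvAddCount]
  -- B side: padded[:10] = B, and tail.count ch is List.count
  rw [take_pad _ (by simp)]
  have hB' : (cs.take 10).map pvChar ++
      List.replicate (10 - ((cs.take 10).map pvChar).length) "" = B := by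
    rw [hB]; congr 2; simp; omega
  rw [hB']
  apply List.map_congr_left
  intro y _
  rw [PySem.List.count_eq]
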